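-- pv_equiv track=rewrite | github.com/sinainal/DockUP | docking_app/routes/report.py | _normalize_order_list
-- ===== SOURCE A (Python) =====
-- from typing import Any
--
-- def _normalize_order_list(raw_list: Any, allowed_items: list[str]) -> list[str]:
--     allowed = [str(item) for item in allowed_items if str(item)]
--     allowed_set = set(allowed)
--     out: list[str] = []
--     seen: set[str] = set()
--
--     if isinstance(raw_list, list):
--         for item in raw_list:
--             key = str(item or "").strip()
--             if not key or key in seen or key not in allowed_set:
--                 continue
--             seen.add(key)
--             out.append(key)
--
--     for key in allowed:
--         if key in seen:
--             continue
--         seen.add(key)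
--         out.append(key)
--     return out
-- ===== SOURCE B (Python) =====
-- from typing import Any
--
--
-- def _normalize_order_list(raw_list: Any, allowed_items: list[str]) -> list[str]:
--     allowed = [str(item) for item in allowed_items if str(item)]
--     allowed_set = set(allowed)
--     index_map: dict[str, int] = {}
--     if isinstance(raw_list, list):
--         for i, item in enumerate(raw_list):
--             key = str(item or "").strip()
--             if key in allowed_set and key not in index_map:
--                 index_map[key] = i
--     missing = (len(raw_list) if isinstance(raw_list, list) else 0) + 1
--     uniq = list(dict.fromkeys(allowed))
--     return sorted(uniq, key=lambda k: index_map.get(k, missing))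
-- ===== Notes on version B (the rewrite author's own statement) =====
-- stated objective: alternative
-- what changed: A threads one mutable seen-set through two sequential append loops; B instead builds a first-occurrence index table for the raw keys and produces the result as a single stable sort of the deduplicated allowed list keyed by that table (absent keys ranked past the end).
import Mathlib
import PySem

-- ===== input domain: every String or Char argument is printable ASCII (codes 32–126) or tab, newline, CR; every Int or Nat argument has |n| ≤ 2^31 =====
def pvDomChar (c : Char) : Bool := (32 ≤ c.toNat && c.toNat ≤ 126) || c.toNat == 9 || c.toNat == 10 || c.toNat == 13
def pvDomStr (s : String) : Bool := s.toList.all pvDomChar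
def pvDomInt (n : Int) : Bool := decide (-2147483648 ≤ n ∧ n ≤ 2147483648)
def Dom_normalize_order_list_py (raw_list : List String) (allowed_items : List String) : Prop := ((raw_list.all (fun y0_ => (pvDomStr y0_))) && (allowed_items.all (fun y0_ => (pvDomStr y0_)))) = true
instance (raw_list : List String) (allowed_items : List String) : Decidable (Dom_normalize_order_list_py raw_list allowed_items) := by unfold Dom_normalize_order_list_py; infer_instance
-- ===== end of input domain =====

-- B replaces A's seen-set threaded through two append loops by a first-occurrence
-- index table over the raw keys plus one stable sort of the deduplicated allowed
-- list keyed by that table (objective: alternative; same return value, no speed claim).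

-- ===== PORT A =====
-- literal transliteration of _normalize_order_list; on List String the isinstance(raw_list, list) guard is always True
def normalize_order_list_py (raw_list : List String) (allowed_items : List String) : List String :=
  let allowed := allowed_items.filter (fun item => !(item == ""))   -- [str(item) for item in allowed_items if str(item)]; str is identity on str
  let allowed_set : PySem.Set String := PySem.Set.ofList allowed
  let st := raw_list.foldl (fun (st : List String × PySem.Set String) item =>
      let key := PySem.Str.strip (if item == "" then "" else item)   -- str(item or "").strip()
      if key == "" || st.2.contains key || !(allowed_set.contains key) then st
      else (st.1 ++ [key], st.2.add key)) ([], PySem.Set.empty)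
  let st2 := allowed.foldl (fun (st : List String × PySem.Set String) key =>
      if st.2.contains key then st else (st.1 ++ [key], st.2.add key)) st
  st2.1

-- ===== PORT B =====
-- literal transliteration of B (Source B): dict.fromkeys dedup = PySem.List.dedup; enumerate = PySem.List.enumerate
def normalize_order_list_py_alt (raw_list : List String) (allowed_items : List String) : List String :=
  let allowed := allowed_items.filter (fun item => !(item == ""))
  let allowed_set : PySem.Set String := PySem.Set.ofList allowed
  let index_map : PySem.Dict String Int :=
    (PySem.List.enumerate raw_list).foldl (fun d p =>
      let key := PySem.Str.strip (if p.2 == "" then "" else p.2)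
      if allowed_set.contains key && !(d.contains key) then d.insert key p.1 else d)
      PySem.Dict.empty
  let missing : Int := (raw_list.length : Int) + 1
  let uniq := PySem.List.dedup allowed
  PySem.List.sorted uniq (fun k => index_map.getD k missing) false

-- ===== PRECONDITION & SPEC =====
def Spec_normalize_order_list_py (raw_list : List String) (allowed_items : List String) (out : List String) : Prop := out = normalize_order_list_py_alt raw_list allowed_items
instance (raw_list : List String) (allowed_items : List String) (out : List String) : Decidable (Spec_normalize_order_list_py raw_list allowed_items out) := by unfold Spec_normalize_order_list_py; infer_instance

-- ===== CLAIM (what is proved, stated in full; the proofs are below) =====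
def Claim_equal_normalize_order_list_py : Prop := ∀ (raw_list : List String) (allowed_items : List String), Dom_normalize_order_list_py raw_list allowed_items → Spec_normalize_order_list_py raw_list allowed_items (normalize_order_list_py raw_list allowed_items)

-- ===== LEMMAS AND PROOFS =====

-- abbreviation used only by the proofs: the cleaned key of one raw item
def pvKey (item : String) : String := PySem.Str.strip (if item == "" then "" else item)

-- the contains test of a Set.ofList agrees with the underlying list's
theorem pv_contains_ofList (xs : List String) (k : String) :
    (PySem.Set.ofList xs).contains k = xs.contains k := by
  by_cases h : k ∈ xs
  · simp [PySem.Set.contains, PySem.Set.mem_ofList, h]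
  · simp [PySem.Set.contains, PySem.Set.mem_ofList, h]

-- phase 1 of A: the (out, seen) pair equals the Set.add-fold over the kept keys
theorem pv_phase1 (aset : PySem.Set String)
    (hne : ∀ k, aset.contains k = true → ¬ (k = "")) :
    ∀ (xs : List String) (o : List String),
      xs.foldl (fun (st : List String × PySem.Set String) item =>
          if pvKey item == "" || st.2.contains (pvKey item) || !(aset.contains (pvKey item)) then st
          else (st.1 ++ [pvKey item], st.2.add (pvKey item))) (o, o)
      = (let r := ((xs.map pvKey).filter (fun k => aset.contains k)).foldl PySem.Set.add o
         (r, r)) := by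
  intro xs
  induction xs with
  | nil => intro o; rfl
  | cons x t ih =>
    intro o
    simp only [List.foldl_cons, List.map_cons, List.filter_cons]
    by_cases ha : aset.contains (pvKey x) = true
    · have hk : ¬ (pvKey x = "") := hne _ ha
      have hk' : (pvKey x == "") = false := beq_eq_false_iff_ne.mpr hk
      by_cases ho : PySem.Set.contains o (pvKey x) = true
      · have hadd : PySem.Set.add o (pvKey x) = o := by
          simp only [PySem.Set.add, ho, if_pos]
        rw [if_pos (by rw [ho]; simp), if_pos ha, List.foldl_cons, hadd]
        exact ih o
      · have ho' : PySem.Set.contains o (pvKey x) = false := Bool.eq_false_iff.mpr ho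
        have hadd : PySem.Set.add o (pvKey x) = o ++ [pvKey x] := by
          simp only [PySem.Set.add, ho']
          simp
        rw [if_neg (by rw [hk', ho', ha]; simp), if_pos ha, List.foldl_cons, hadd]
        exact ih _
    · have ha' : aset.contains (pvKey x) = false := Bool.eq_false_iff.mpr ha
      rw [if_pos (by rw [ha']; simp), if_neg (by rw [ha']; simp)]
      exact ih o

-- phase 2 of A is the Set.add-fold too
theorem pv_phase2 :
    ∀ (ys : List String) (o : List String),
      ys.foldl (fun (st : List String × PySem.Set String) key =>
          if st.2.contains key then st else (st.1 ++ [key], st.2.add key)) (o, o)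
      = (ys.foldl PySem.Set.add o, ys.foldl PySem.Set.add o) := by
  intro ys
  induction ys with
  | nil => intro o; rfl
  | cons y t ih =>
    intro o
    simp only [List.foldl_cons]
    by_cases ho : PySem.Set.contains o y = true
    · have hadd : PySem.Set.add o y = o := by simp only [PySem.Set.add, ho, if_pos]
      rw [if_pos ho, hadd]
      exact ih o
    · have hadd : PySem.Set.add o y = o ++ [y] := by
        rw [PySem.Set.add, if_neg ho]
      rw [if_neg ho, hadd]
      exact ih _

-- a Set.add-fold started from s ++ t.filter(∉ s) splits off s
theorem pv_add_fold_split (s : List String) :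
    ∀ (ys t : List String),
      ys.foldl PySem.Set.add (s ++ t.filter (fun k => !(s.contains k)))
      = s ++ (ys.foldl PySem.Set.add t).filter (fun k => !(s.contains k)) := by
  intro ys
  induction ys with
  | nil => intro t; rfl
  | cons y t0 ih =>
    intro t
    simp only [List.foldl_cons]
    have hstep : PySem.Set.add (s ++ t.filter (fun k => !(s.contains k))) y
        = s ++ (PySem.Set.add t y).filter (fun k => !(s.contains k)) := by
      by_cases hs : y ∈ s
      · have hc : (PySem.Set.contains (s ++ t.filter (fun k => !(s.contains k))) y) = true := by
          simp [PySem.Set.contains, hs]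
        rw [PySem.Set.add, if_pos hc]
        by_cases ht : y ∈ t
        · have : PySem.Set.add t y = t := by simp [PySem.Set.add, PySem.Set.contains, ht]
          rw [this]
        · have : PySem.Set.add t y = t ++ [y] := by
            simp [PySem.Set.add, PySem.Set.contains, ht]
          rw [this, List.filter_append]
          simp [hs]
      · by_cases ht : y ∈ t
        · have hc : (PySem.Set.contains (s ++ t.filter (fun k => !(s.contains k))) y) = true := by
            simp [PySem.Set.contains, List.mem_filter, ht, hs]
          rw [PySem.Set.add, if_pos hc]
          have : PySem.Set.add t y = t := by simp [PySem.Set.add, PySem.Set.contains, ht]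
          rw [this]
        · have hc : ¬ (PySem.Set.contains (s ++ t.filter (fun k => !(s.contains k))) y) = true := by
            simp [PySem.Set.contains, List.mem_filter, ht, hs]
          rw [PySem.Set.add, if_neg hc]
          have : PySem.Set.add t y = t ++ [y] := by
            simp [PySem.Set.add, PySem.Set.contains, ht]
          rw [this, List.filter_append, List.append_assoc]
          simp [hs]
    rw [hstep]
    exact ih _

-- A's two folds against the prefix ++ remainder normal form
theorem pv_assemble (F allowed : List String) :
    List.foldl PySem.Set.add (List.foldl PySem.Set.add ([] : List String) F) allowed
    = (PySem.Set.ofList F : List String) ++ (PySem.Set.ofList allowed : List String).filter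
        (fun k => !((PySem.Set.ofList F : List String).contains k)) := by
  have h1 : (PySem.Set.ofList F : List String) = List.foldl PySem.Set.add ([] : List String) F := rfl
  have h2 : (PySem.Set.ofList allowed : List String)
      = List.foldl PySem.Set.add ([] : List String) allowed := rfl
  have hsplit := pv_add_fold_split (PySem.Set.ofList F) allowed ([] : List String)
  simp only [List.filter_nil, List.append_nil] at hsplit
  rw [← h1, hsplit, ← h2]
  simp [PySem.Set.contains_eq_listContains]

-- ---------- B side: the index table ----------

-- one step of B's index-building loop
def pvStep (aset : PySem.Set String) (d : PySem.Dict String Int) (p : Int × String) :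
    PySem.Dict String Int :=
  if aset.contains (pvKey p.2) && !(d.contains (pvKey p.2)) then d.insert (pvKey p.2) p.1 else d

-- invariant of B's enumerate-fold: keys grow exactly like the Set.add-fold over the kept keys,
-- keys stay distinct, and the stored indices are strictly increasing and below the running index
theorem pv_dict_inv (aset : PySem.Set String) :
    ∀ (raw : List String) (n : Int) (d : PySem.Dict String Int),
      d.keys.Nodup →
      (∀ p ∈ d.items, p.2 < n) →
      d.items.Pairwise (fun p q => p.2 < q.2) →
      ((PySem.List.enumerate raw n).foldl (pvStep aset) d).keys
          = ((raw.map pvKey).filter (fun k => aset.contains k)).foldl PySem.Set.add d.keys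
      ∧ ((PySem.List.enumerate raw n).foldl (pvStep aset) d).keys.Nodup
      ∧ (∀ p ∈ ((PySem.List.enumerate raw n).foldl (pvStep aset) d).items,
          p.2 < n + raw.length)
      ∧ ((PySem.List.enumerate raw n).foldl (pvStep aset) d).items.Pairwise
          (fun p q => p.2 < q.2) := by
  intro raw
  induction raw with
  | nil =>
    intro n d hnd hlt hpw
    refine ⟨rfl, hnd, ?_, hpw⟩
    intro p hp
    have := hlt p hp
    simp only [List.length_nil, Nat.cast_zero, add_zero]
    exact this
  | cons x t ih =>
    intro n d hnd hlt hpw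
    rw [PySem.List.enumerate_cons]
    simp only [List.foldl_cons, List.map_cons, List.filter_cons]
    by_cases ha : aset.contains (pvKey x) = true
    · by_cases hc : d.contains (pvKey x) = true
      · have hstep : pvStep aset d (n, x) = d := by
          show (if aset.contains (pvKey x) && !(d.contains (pvKey x))
                then d.insert (pvKey x) n else d) = d
          rw [if_neg]
          rw [hc]
          simp
        have hadd : PySem.Set.add d.keys (pvKey x) = d.keys := by
          have : pvKey x ∈ d.keys := (PySem.Dict.contains_iff_mem_keys _ _).mp hc
          exact PySem.Set.add_of_mem this
        have := ih (n + 1) d hnd (fun p hp => lt_trans (hlt p hp) (by omega)) hpw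
        rw [hstep, if_pos ha, List.foldl_cons, hadd]
        refine ⟨this.1, this.2.1, fun p hp => ?_, this.2.2.2⟩
        have := this.2.2.1 p hp
        simp only [List.length_cons]
        push_cast
        push_cast at this
        omega
      · have hc' : d.contains (pvKey x) = false := Bool.eq_false_iff.mpr hc
        have hstep : pvStep aset d (n, x) = d.insert (pvKey x) n := by
          show (if aset.contains (pvKey x) && !(d.contains (pvKey x))
                then d.insert (pvKey x) n else d) = d.insert (pvKey x) n
          rw [if_pos]
          rw [ha, hc']
          rfl
        have hitems : (d.insert (pvKey x) n).items = d.items ++ [(pvKey x, n)] :=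
          PySem.Dict.items_insert_of_not_contains d n hc'
        have hmem : pvKey x ∉ d.keys := by
          intro h
          exact absurd ((PySem.Dict.contains_iff_mem_keys _ _).mpr h) (by simp [hc'])
        have hkeys : (d.insert (pvKey x) n).keys = d.keys ++ [pvKey x] :=
          PySem.Dict.keys_insert_of_not_contains d n hc'
        have hadd : PySem.Set.add d.keys (pvKey x) = d.keys ++ [pvKey x] :=
          PySem.Set.add_of_not_mem hmem
        have hnd' : (d.insert (pvKey x) n).keys.Nodup := by
          rw [hkeys]
          refine List.Nodup.append hnd (List.nodup_singleton _) ?_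
          intro a haa hab
          rw [List.mem_singleton] at hab
          exact hmem (hab ▸ haa)
        have hlt' : ∀ p ∈ (d.insert (pvKey x) n).items, p.2 < n + 1 := by
          intro p hp
          rw [hitems] at hp
          rcases List.mem_append.mp hp with h | h
          · exact lt_trans (hlt p h) (by omega)
          · rw [List.mem_singleton] at h
            subst h
            show n < n + 1
            omega
        have hpw' : (d.insert (pvKey x) n).items.Pairwise (fun p q => p.2 < q.2) := by
          rw [hitems]
          refine List.pairwise_append.mpr ⟨hpw, by simp, ?_⟩
          intro p hp q hq
          rw [List.mem_singleton] at hq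
          subst hq
          exact hlt p hp
        have := ih (n + 1) (d.insert (pvKey x) n) hnd' hlt' hpw'
        rw [hstep, if_pos ha, List.foldl_cons, hadd, ← hkeys]
        refine ⟨this.1, this.2.1, fun p hp => ?_, this.2.2.2⟩
        have := this.2.2.1 p hp
        simp only [List.length_cons]
        push_cast
        push_cast at this
        omega
    · have ha' : aset.contains (pvKey x) = false := Bool.eq_false_iff.mpr ha
      have hstep : pvStep aset d (n, x) = d := by
        show (if aset.contains (pvKey x) && !(d.contains (pvKey x))
              then d.insert (pvKey x) n else d) = d
        rw [if_neg]
        rw [ha']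
        simp
      have := ih (n + 1) d hnd (fun p hp => lt_trans (hlt p hp) (by omega)) hpw
      rw [hstep, if_neg ha]
      refine ⟨this.1, this.2.1, fun p hp => ?_, this.2.2.2⟩
      have := this.2.2.1 p hp
      simp only [List.length_cons]
      push_cast
      push_cast at this
      omega

-- ---------- B side: the stable sort ----------

-- inserting an element strictly below a tail of key-B elements commutes with the tail
theorem pv_insertBy_split (key : String → Int) (B : Int) (x : String) (hx : key x < B) :
    ∀ (L H : List String), (∀ y ∈ H, key y = B) →
      PySem.List.insertBy (fun a b => decide (key a < key b)) x (L ++ H)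
        = PySem.List.insertBy (fun a b => decide (key a < key b)) x L ++ H := by
  intro L
  induction L with
  | nil =>
    intro H hH
    cases H with
    | nil => rfl
    | cons h t =>
      have : key x < key h := by rw [hH h (by simp)]; exact hx
      simp [PySem.List.insertBy, this]
  | cons a L ih =>
    intro H hH
    by_cases hcmp : key x < key a
    · simp [PySem.List.insertBy, hcmp]
    · simp only [List.cons_append, PySem.List.insertBy, hcmp, decide_false]
      simp only [Bool.false_eq_true, if_false]
      rw [ih H hH]
      exact List.cons_append.symm

-- an element with key exactly B goes to the very end
theorem pv_insertBy_last (key : String → Int) (B : Int) (x : String) (hx : key x = B)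
    (L H : List String) (hL : ∀ y ∈ L, key y < B) (hH : ∀ y ∈ H, key y = B) :
    PySem.List.insertBy (fun a b => decide (key a < key b)) x (L ++ H)
      = L ++ H ++ [x] := by
  apply PySem.List.insertBy_of_forall_not_before
  intro y hy
  rcases List.mem_append.mp hy with h | h
  · simp only [decide_eq_false_iff_not, not_lt]
    have := hL y h
    omega
  · simp only [decide_eq_false_iff_not, not_lt]
    have := hH y h
    omega

-- the two-block shape of B's stable insertion sort: keys < B sort among themselves
-- in front, key-B elements keep their arrival order behind
theorem pv_two_block (key : String → Int) (B : Int) :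
    ∀ (xs L H : List String), (∀ y ∈ L, key y < B) → (∀ y ∈ H, key y = B) →
      (∀ x ∈ xs, key x < B ∨ key x = B) →
      xs.foldl (fun acc x => PySem.List.insertBy (fun a b => decide (key a < key b)) x acc) (L ++ H)
      = (xs.filter (fun x => decide (key x < B))).foldl
          (fun acc x => PySem.List.insertBy (fun a b => decide (key a < key b)) x acc) L
        ++ (H ++ xs.filter (fun x => decide (key x = B))) := by
  intro xs
  induction xs with
  | nil => intro L H _ _ _; simp
  | cons x t ih =>
    intro L H hL hH hx
    simp only [List.foldl_cons, List.filter_cons]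
    rcases hx x (by simp) with h | h
    · have hlt : ¬ (key x = B) := by omega
      rw [pv_insertBy_split key B x h L H hH]
      rw [if_pos (by simpa using h), if_neg (by simpa using hlt)]
      simp only [List.foldl_cons]
      exact ih _ H (fun y hy => by
          rcases (PySem.List.mem_insertBy _ _ _ _).mp hy with rfl | hy'
          · exact h
          · exact hL y hy') hH (fun y hy => hx y (by simp [hy]))
    · have hlt : ¬ (key x < B) := by omega
      rw [pv_insertBy_last key B x h L H hL hH]
      rw [if_neg (by simpa using hlt), if_pos (by simpa using h)]
      have := ih L (H ++ [x]) hL (fun y hy => by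
          rcases List.mem_append.mp hy with h' | h'
          · exact hH y h'
          · simp at h'; rw [h']; exact h) (fun y hy => hx y (by simp [hy]))
      rw [← List.append_assoc] at this
      rw [this]
      simp

-- the same, started from the empty accumulator
theorem pv_two_block_nil (key : String → Int) (B : Int) (xs : List String)
    (hx : ∀ x ∈ xs, key x < B ∨ key x = B) :
    xs.foldl (fun acc x => PySem.List.insertBy (fun a b => decide (key a < key b)) x acc) []
      = (xs.filter (fun x => decide (key x < B))).foldl
          (fun acc x => PySem.List.insertBy (fun a b => decide (key a < key b)) x acc) []
        ++ xs.filter (fun x => decide (key x = B)) := by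
  have h := pv_two_block key B xs [] []
      (fun y hy => absurd hy (List.not_mem_nil))
      (fun y hy => absurd hy (List.not_mem_nil)) hx
  simpa using h

-- ---------- assembling both sides ----------

-- proof-side names for the shared pieces
def pvAllowed (al : List String) : List String := al.filter (fun item => !(item == ""))
def pvAset (al : List String) : PySem.Set String := PySem.Set.ofList (pvAllowed al)
def pvF (raw al : List String) : List String :=
  (raw.map pvKey).filter (fun k => (pvAset al).contains k)
def pvD (raw al : List String) : PySem.Dict String Int :=
  (PySem.List.enumerate raw).foldl (pvStep (pvAset al)) PySem.Dict.empty
def pvM (raw : List String) : Int := (raw.length : Int) + 1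
def pvOut (raw al : List String) : List String :=
  (PySem.Set.ofList (pvF raw al) : List String)
    ++ (PySem.Set.ofList (pvAllowed al) : List String).filter
      (fun k => !((PySem.Set.ofList (pvF raw al) : List String).contains k))

theorem pv_hne (al : List String) :
    ∀ k, (pvAset al).contains k = true → ¬ (k = "") := by
  intro k hk hk0
  rw [pvAset, pv_contains_ofList] at hk
  have := List.mem_filter.mp (List.contains_iff_mem.mp hk)
  simp [hk0] at this

-- A's value in normal form
theorem pv_A_norm (raw al : List String) :
    normalize_order_list_py raw al = pvOut raw al := by
  have step1 : normalize_order_list_py raw al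
      = ((pvAllowed al).foldl (fun (st : List String × PySem.Set String) key =>
            if st.2.contains key then st else (st.1 ++ [key], st.2.add key))
          (raw.foldl (fun (st : List String × PySem.Set String) item =>
            if pvKey item == "" || st.2.contains (pvKey item)
                || !((pvAset al).contains (pvKey item)) then st
            else (st.1 ++ [pvKey item], st.2.add (pvKey item)))
          (([] : List String), ([] : List String)))).1 := rfl
  rw [step1, pv_phase1 (pvAset al) (pv_hne al) raw []]
  dsimp only
  rw [pv_phase2 (pvAllowed al)]
  dsimp only
  exact pv_assemble (pvF raw al) (pvAllowed al)

-- facts about the final index table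
theorem pv_keys_eq (raw al : List String) :
    (pvD raw al).keys = (PySem.Set.ofList (pvF raw al) : List String) := by
  have hinv := pv_dict_inv (pvAset al) raw 0 PySem.Dict.empty
      List.nodup_nil (fun p hp => absurd hp (List.not_mem_nil)) List.Pairwise.nil
  rw [pvD, hinv.1]
  rfl

theorem pv_inv' (raw al : List String) :
    (pvD raw al).keys.Nodup ∧ (∀ p ∈ (pvD raw al).items, p.2 < pvM raw)
      ∧ (pvD raw al).items.Pairwise (fun p q => p.2 < q.2) := by
  have hinv := pv_dict_inv (pvAset al) raw 0 PySem.Dict.empty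
      List.nodup_nil (fun p hp => absurd hp (List.not_mem_nil)) List.Pairwise.nil
  refine ⟨hinv.2.1, fun p hp => ?_, hinv.2.2.2⟩
  have := hinv.2.2.1 p hp
  rw [pvM]
  omega

theorem pv_low (raw al : List String) :
    ∀ k ∈ (PySem.Set.ofList (pvF raw al) : List String),
      (pvD raw al).getD k (pvM raw) < pvM raw := by
  intro k hk
  rw [← pv_keys_eq] at hk
  simp only [PySem.Dict.keys] at hk
  obtain ⟨p, hp, rfl⟩ := List.mem_map.mp hk
  have h1 : (pvD raw al).getD p.1 (pvM raw) = p.2 :=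
    PySem.Dict.getD_of_mem_items _ hp (pv_inv' raw al).1 _
  rw [h1]
  exact (pv_inv' raw al).2.1 p hp

theorem pv_high (raw al : List String) :
    ∀ k, k ∉ (PySem.Set.ofList (pvF raw al) : List String) →
      (pvD raw al).getD k (pvM raw) = pvM raw := by
  intro k hk
  have hc : (pvD raw al).contains k = false := by
    by_contra h
    have := (PySem.Dict.contains_iff_mem_keys (pvD raw al) k).mp (Bool.not_eq_false _ ▸ h)
    rw [pv_keys_eq] at this
    exact hk this
  exact PySem.Dict.getD_of_not_contains _ _ hc

-- sorting the raw-present allowed keys by their first raw index restores raw order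
theorem pv_lows_sorted (raw al : List String) :
    PySem.List.sorted ((PySem.Set.ofList (pvAllowed al) : List String).filter
        (fun x => decide ((pvD raw al).getD x (pvM raw) < pvM raw)))
      (fun k => (pvD raw al).getD k (pvM raw))
      = (PySem.Set.ofList (pvF raw al) : List String) := by
  apply PySem.List.sorted_eq_of_perm_of_pairwise_lt
  · -- the prefix is a permutation of the filtered lows
    refine (List.perm_ext_iff_of_nodup (PySem.Set.nodup_ofList _)
      ((PySem.Set.nodup_ofList _).filter _)).mpr ?_
    intro a
    constructor
    · intro ha
      rw [List.mem_filter]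
      refine ⟨?_, by simpa using pv_low raw al a ha⟩
      have hmemF : a ∈ pvF raw al := (PySem.Set.mem_ofList _ _).mp ha
      have hcont := (List.mem_filter.mp hmemF).2
      rw [pvAset, pv_contains_ofList] at hcont
      exact (PySem.Set.mem_ofList _ _).mpr (List.contains_iff_mem.mp hcont)
    · intro ha
      have h1 := List.mem_filter.mp ha
      by_contra hnot
      have h3 := pv_high raw al a hnot
      have h2 : (pvD raw al).getD a (pvM raw) < pvM raw := by simpa using h1.2
      omega
  · -- the prefix carries strictly increasing first indices
    rw [← pv_keys_eq raw al]
    simp only [PySem.Dict.keys]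
    rw [List.pairwise_map]
    refine ((pv_inv' raw al).2.2).imp_of_mem ?_
    intro p q hp hq hlt
    have e1 : (pvD raw al).getD p.1 (pvM raw) = p.2 :=
      PySem.Dict.getD_of_mem_items _ hp (pv_inv' raw al).1 _
    have e2 : (pvD raw al).getD q.1 (pvM raw) = q.2 :=
      PySem.Dict.getD_of_mem_items _ hq (pv_inv' raw al).1 _
    rw [e1, e2]
    exact hlt

-- B's value in normal form: the sort undoes into the same prefix ++ remainder
theorem pv_B_norm (raw al : List String) :
    normalize_order_list_py_alt raw al = pvOut raw al := by
  have step1 : normalize_order_list_py_alt raw al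
      = PySem.List.sorted (PySem.Set.ofList (pvAllowed al) : List String)
          (fun k => (pvD raw al).getD k (pvM raw)) := by
    unfold normalize_order_list_py_alt pvD pvAset pvM pvAllowed pvStep pvKey
    simp only [PySem.List.dedup_eq_ofList]
  rw [step1]
  have hex : ∀ x ∈ (PySem.Set.ofList (pvAllowed al) : List String),
      (pvD raw al).getD x (pvM raw) < pvM raw ∨ (pvD raw al).getD x (pvM raw) = pvM raw := by
    intro x _
    by_cases hx : x ∈ (PySem.Set.ofList (pvF raw al) : List String)
    · exact Or.inl (pv_low raw al x hx)
    · exact Or.inr (pv_high raw al x hx)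
  rw [PySem.List.sorted_eq_foldl_insertBy,
    pv_two_block_nil (fun k => (pvD raw al).getD k (pvM raw)) (pvM raw) _ hex,
    ← PySem.List.sorted_eq_foldl_insertBy, pv_lows_sorted raw al, pvOut]
  congr 1
  apply List.filter_congr
  intro k _
  by_cases hk : k ∈ (PySem.Set.ofList (pvF raw al) : List String)
  · have h1 := pv_low raw al k hk
    have h2 : (PySem.Set.ofList (pvF raw al) : List String).contains k = true :=
      List.contains_iff_mem.mpr hk
    simp only [h2, Bool.not_true, decide_eq_false_iff_not]
    omega
  · have h1 := pv_high raw al k hk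
    have h2 : (PySem.Set.ofList (pvF raw al) : List String).contains k = false := by
      rw [Bool.eq_false_iff]
      intro h
      exact hk (List.contains_iff_mem.mp h)
    simp [h1]
    intro h
    exact hk ((PySem.Set.mem_ofList _ _).mpr h)

-- ===== VERDICT (by name: the statement is the Claim_ definition above) =====
theorem normalize_order_list_py_spec : Claim_equal_normalize_order_list_py := by
  intro raw_list allowed_items _
  unfold Spec_normalize_order_list_py
  rw [pv_A_norm, pv_B_norm]
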